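-- pv_equiv track=rewrite | github.com/Jayxuchen/boneapp | core/phraseConverter.py | buildWordList
-- ===== SOURCE A (Python) =====
-- def buildWordList(phrase):
--     words = []        # add sounds one by one into this words list, empty list for now
--     temp = ""
--     counter = 0
--     prevIndex = counter
--     for c in phrase:    # assumes phrase has a period at the end of the string
--         if c == '.':
--             cluster = [temp, prevIndex]
--             words.append(cluster)
--             prevIndex = counter+1
--             temp = ""
--         else:
--             temp += c
--         counter += 1
--     return words
-- ===== SOURCE B (Python) =====
-- def buildWordList(phrase):
--     words = []
--     index = 0
--     parts = phrase.split('.')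
--     for part in parts[:-1]:
--         words.append([part, index])
--         index += len(part) + 1
--     return words
-- ===== Notes on version B (the rewrite author's own statement) =====
-- stated objective: simpler
-- what changed: Replaces the character-by-character Python state machine (temp buffer, counter, prevIndex) with a single native str.split on the period separator followed by a running-index loop over all parts but the last (the per-character interpreted loop disappears).
import Mathlib
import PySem

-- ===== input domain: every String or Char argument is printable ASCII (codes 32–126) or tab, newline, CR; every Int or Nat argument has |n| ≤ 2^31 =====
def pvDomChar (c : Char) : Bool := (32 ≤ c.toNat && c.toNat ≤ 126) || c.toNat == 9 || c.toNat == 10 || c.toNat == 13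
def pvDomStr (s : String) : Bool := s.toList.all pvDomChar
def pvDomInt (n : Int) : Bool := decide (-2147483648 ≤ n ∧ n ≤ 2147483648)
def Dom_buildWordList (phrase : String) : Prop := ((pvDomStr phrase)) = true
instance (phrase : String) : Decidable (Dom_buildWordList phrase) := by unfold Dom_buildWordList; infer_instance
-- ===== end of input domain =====

-- B replaces A's char-by-char state machine by a split on periods plus a running-index loop (simpler decomposition, same O(n) cost).


-- ===== PORT A =====
-- A's loop: state (words, temp, counter, prevIndex), one step per character.
def pvALoop : List Char → List (String × Int) → List Char → Int → Int → List (String × Int)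
  | [], words, _, _, _ => words
  | c :: cs, words, temp, counter, prevIndex =>
      if c = '.' then
        pvALoop cs (words ++ [(String.ofList temp, prevIndex)]) [] (counter + 1) (counter + 1)
      else
        pvALoop cs words (temp ++ [c]) (counter + 1) prevIndex

def buildWordList (phrase : String) : List (String × Int) :=
  pvALoop phrase.toList [] [] 0 0

-- ===== PORT B =====
-- phrase.split('.') for the single-character separator, exactly Python's semantics
-- (''.split('.') = [''], empty pieces kept, trailing piece kept).
def pvSplit (sep : Char) : List Char → List (List Char)
  | [] => [[]]
  | c :: cs =>
      if c = sep then [] :: pvSplit sep cs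
      else
        match pvSplit sep cs with
        | [] => [[c]]        -- unreachable: pvSplit never returns []
        | p :: ps => (c :: p) :: ps

-- B's loop: for part in parts[:-1]: words.append([part, index]); index += len(part)+1
def buildWordList_alt (phrase : String) : List (String × Int) :=
  (((pvSplit '.' phrase.toList).dropLast).foldl
    (fun (st : List (String × Int) × Int) p =>
      (st.1 ++ [(String.ofList p, st.2)], st.2 + (p.length : Int) + 1)) ([], 0)).1

-- ===== PRECONDITION & SPEC =====
def Spec_buildWordList (phrase : String) (out : List (String × Int)) : Prop := out = buildWordList_alt phrase
instance (phrase : String) (out : List (String × Int)) : Decidable (Spec_buildWordList phrase out) := by unfold Spec_buildWordList; infer_instance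

-- ===== CLAIM (what is proved, stated in full; the proofs are below) =====
def Claim_equal_buildWordList : Prop := ∀ (phrase : String), Dom_buildWordList phrase → Spec_buildWordList phrase (buildWordList phrase)

-- ===== LEMMAS AND PROOFS =====

def pvG (st : List (String × Int) × Int) (p : List Char) : List (String × Int) × Int :=
  (st.1 ++ [(String.ofList p, st.2)], st.2 + (p.length : Int) + 1)

theorem pvSplit_ne_nil (sep : Char) (cs : List Char) : pvSplit sep cs ≠ [] := by
  induction cs with
  | nil => simp [pvSplit]
  | cons c cs ih =>
      simp only [pvSplit]
      split
      · simp
      · cases h : pvSplit sep cs <;> simp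

theorem pvSplit_no_sep (sep : Char) (t : List Char) (h : sep ∉ t) :
    pvSplit sep t = [t] := by
  induction t with
  | nil => rfl
  | cons c cs ih =>
      simp only [List.mem_cons, not_or] at h
      simp only [pvSplit]
      rw [if_neg (by exact fun hc => h.1 hc.symm), ih h.2]

theorem pvSplit_append_sep (sep : Char) (t r : List Char) (h : sep ∉ t) :
    pvSplit sep (t ++ sep :: r) = t :: pvSplit sep r := by
  induction t with
  | nil => simp [pvSplit]
  | cons c cs ih =>
      simp only [List.mem_cons, not_or] at h
      simp only [List.cons_append, pvSplit]
      rw [if_neg (by exact fun hc => h.1 hc.symm), ih h.2]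

theorem pvMain (cs temp : List Char) (prev : Int) (words : List (String × Int))
    (hnd : '.' ∉ temp) :
    pvALoop cs words temp (prev + (temp.length : Int)) prev =
      (((pvSplit '.' (temp ++ cs)).dropLast).foldl pvG (words, prev)).1 := by
  induction cs generalizing temp prev words with
  | nil =>
      rw [List.append_nil, pvSplit_no_sep _ _ hnd]
      simp [pvALoop]
  | cons c cs ih =>
      by_cases hc : c = '.'
      · subst hc
        rw [pvSplit_append_sep _ _ _ hnd]
        have hih := ih [] (prev + (temp.length : Int) + 1)
              (words ++ [(String.ofList temp, prev)]) (by simp)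
        simp only [List.length_nil, Nat.cast_zero, add_zero, List.nil_append] at hih
        simp only [pvALoop, if_true]
        rw [hih]
        cases h : pvSplit '.' cs with
        | nil => exact absurd h (pvSplit_ne_nil _ _)
        | cons p ps =>
            simp [List.dropLast, pvG]
      · simp only [pvALoop, if_neg hc]
        have h1 : prev + (temp.length : Int) + 1 = prev + (((temp ++ [c]).length : Nat) : Int) := by
          simp; ring
        rw [h1, ih (temp ++ [c]) prev words (by simp [hnd, Ne.symm hc])]
        simp

-- ===== VERDICT (by name: the statement is the Claim_ definition above) =====
theorem buildWordList_spec : Claim_equal_buildWordList := by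
  intro phrase _
  unfold Spec_buildWordList buildWordList buildWordList_alt
  have := pvMain phrase.toList [] 0 [] (by simp)
  simpa [pvG] using this
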